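-- pv_equiv track=rewrite | github.com/Chinchill-AI/chat-sdk-python | src/chat_sdk/shared/streaming_markdown.py | _close_emphasis
-- ===== SOURCE A (Python) =====
-- def _close_emphasis(result: str, stripped: str, ch: str) -> str:
--     """Close unclosed bold/italic emphasis for a single marker character.
--
--     Scans *stripped* (text with code spans/fences removed) left-to-right,
--     grouping consecutive runs of *ch* into delimiter tokens.  Tracks a
--     simple open/close stack for ``ch*2`` (bold) and ``ch`` (italic),
--     then appends whatever closing sequence is needed to *result*.
--
--     The algorithm mirrors CommonMark's emphasis handling at a simplified
--     level: a run of 2+ characters opens/closes bold first, then any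
--     remaining single character opens/closes italic.
--
--     To guarantee idempotency the suffix is separated from any trailing
--     marker run by a zero-width space so it cannot merge with existing
--     characters and create new openers on re-scan.
--     """
--     # Collect runs of the marker character (e.g. *, **, ***).
--     runs: list[int] = []
--     i = 0
--     while i < len(stripped):
--         if stripped[i] == "\\":
--             i += 2
--             continue
--         if stripped[i] == ch:
--             run_len = 0
--             while i < len(stripped) and stripped[i] == ch:
--                 run_len += 1
--                 i += 1
--             runs.append(run_len)
--         else:
--             i += 1
--
--     # Walk runs and track open bold / italic state.
--     bold_open = False
--     italic_open = False
--     for run in runs: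
--         remaining = run
--         # Process pairs (bold toggles) first.
--         while remaining >= 2:
--             bold_open = not bold_open
--             remaining -= 2
--         # A leftover single character toggles italic.
--         if remaining == 1:
--             italic_open = not italic_open
--
--     if not bold_open and not italic_open:
--         return result
--
--     suffix = ""
--     # Close in reverse order: italic first (inner), then bold (outer).
--     if italic_open:
--         suffix += ch
--     if bold_open:
--         suffix += ch * 2
--
--     # If the result already ends with the marker character, inserting the
--     # suffix directly would merge with the trailing run and change the
--     # delimiter structure on re-scan (breaking idempotency).  Insert a
--     # zero-width space (U+200B) as a separator so the suffix is parsed as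
--     # its own distinct run.
--     if result.endswith(ch):
--         return result + "\u200b" + suffix
--     return result + suffix
-- ===== SOURCE B (Python) =====
-- def _close_emphasis(result: str, stripped: str, ch: str) -> str:
--     """Staged pipeline: mask non-marker text (escape pairs collapse to one
--     separator), split out the marker runs, and get the open bold/italic
--     state from closed-form parity sums over the run lengths."""
--     # Stage 1: one masking pass. Every character that is not an unescaped
--     # marker becomes a NUL separator; an escape pair contributes a single
--     # separator so it still breaks runs.
--     masked = []
--     esc = False
--     for c in stripped:
--         if esc:
--             esc = False
--         elif c == "\\":
--             esc = True
--             masked.append("\0")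
--         elif c == ch:
--             masked.append(c)
--         else:
--             masked.append("\0")
--     # Stage 2: the marker runs are exactly the non-empty pieces of the mask.
--     runs = [len(r) for r in "".join(masked).split("\0") if r]
--     # Stage 3: parity arithmetic instead of toggle walks.
--     italic_open = sum(r % 2 for r in runs) % 2 == 1
--     bold_open = sum(r // 2 for r in runs) % 2 == 1
--     if not (bold_open or italic_open):
--         return result
--     suffix = (ch if italic_open else "") + (ch * 2 if bold_open else "")
--     sep = "\u200b" if result.endswith(ch) else ""
--     return result + sep + suffix
-- ===== Notes on version B (the rewrite author's own statement) =====
-- stated objective: alternative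
-- what changed: B replaces A's index-driven scan (runs list + inner run-grouping while + toggle loops) by a staged pipeline: one masking pass that turns every non-marker position (and each escape pair) into a NUL separator, a split on that separator to read off the marker runs, and closed-form parity sums over the run lengths instead of toggle walks.
import Mathlib
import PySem

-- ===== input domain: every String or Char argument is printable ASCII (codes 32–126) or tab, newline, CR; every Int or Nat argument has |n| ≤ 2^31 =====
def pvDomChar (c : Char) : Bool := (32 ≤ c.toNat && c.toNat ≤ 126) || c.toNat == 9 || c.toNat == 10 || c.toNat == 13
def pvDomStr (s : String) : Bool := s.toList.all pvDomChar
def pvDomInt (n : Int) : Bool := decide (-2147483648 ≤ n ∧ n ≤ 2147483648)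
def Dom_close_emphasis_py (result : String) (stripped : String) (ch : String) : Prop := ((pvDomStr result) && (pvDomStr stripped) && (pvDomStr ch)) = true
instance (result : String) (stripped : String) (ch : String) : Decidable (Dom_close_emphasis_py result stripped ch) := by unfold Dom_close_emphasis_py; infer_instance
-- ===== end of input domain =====

-- B replaces A's index-scan + runs-list + toggle-loop by a staged mask-and-split pipeline with closed-form parity sums; objective: alternative.


-- ===== PORT A =====
-- A's outer while loop collecting run lengths: i advances by 2 on '\', by the run length at a marker, else by 1.
-- stripped[i] == ch is the 1-char string String.ofList [c] compared with ch, exactly Python's comparison.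
def pvRunsA (ch : String) : List Char → List Nat
  | [] => []
  | c :: rest =>
    if c = '\\' then pvRunsA ch (rest.drop 1)
    else if String.ofList [c] == ch then
      -- inner while: run_len = 1 (for c) + following chars equal to ch
      let k := (rest.takeWhile (fun c' => String.ofList [c'] == ch)).length
      (k + 1) :: pvRunsA ch (rest.drop k)
    else pvRunsA ch rest
  termination_by l => l.length
  decreasing_by all_goals simp

-- 'while remaining >= 2: bold_open = not bold_open; remaining -= 2'
def pvPairLoop : Nat → Bool → Nat × Bool
  | r, b => if r ≥ 2 then pvPairLoop (r - 2) (!b) else (r, b)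

def close_emphasis_py (result : String) (stripped : String) (ch : String) : String :=
  let runs := pvRunsA ch stripped.toList
  let st := runs.foldl (fun (st : Bool × Bool) run =>
      let p := pvPairLoop run st.1
      (p.2, if p.1 = 1 then !st.2 else st.2)) (false, false)
  let bold := st.1
  let italic := st.2
  if !bold && !italic then result
  else
    let suffix := (if italic then ch.toList else []) ++ (if bold then ch.toList ++ ch.toList else [])
    if PySem.Str.endswith result ch then String.ofList (result.toList ++ ['\u200B'] ++ suffix)
    else String.ofList (result.toList ++ suffix)

-- ===== PORT B =====
-- B stage 1: the masking for-loop with its esc flag as recursion state; every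
-- non-marker position (and each escape pair, once) becomes the NUL separator.
def pvMaskB (ch : String) : List Char → Bool → List Char
  | [], _ => []
  | _ :: rest, true => pvMaskB ch rest false
  | c :: rest, false =>
    if c = '\\' then '\u0000' :: pvMaskB ch rest true
    else if String.ofList [c] == ch then c :: pvMaskB ch rest false
    else '\u0000' :: pvMaskB ch rest false

-- Source B's "".join(masked).split("\0") ported as List.splitOn, which is exact for a one-character separator.
def close_emphasis_py_alt (result : String) (stripped : String) (ch : String) : String :=
  let masked := pvMaskB ch stripped.toList false
  let runs := ((masked.splitOn '\u0000').filter (· ≠ [])).map List.length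
  let italic := (runs.map (· % 2)).sum % 2 == 1
  let bold := (runs.map (· / 2)).sum % 2 == 1
  if !(bold || italic) then result
  else
    let suffix := (if italic then ch.toList else []) ++ (if bold then ch.toList ++ ch.toList else [])
    let sep := if PySem.Str.endswith result ch then ['\u200B'] else []
    String.ofList (result.toList ++ sep ++ suffix)

-- ===== PRECONDITION & SPEC =====
def Spec_close_emphasis_py (result : String) (stripped : String) (ch : String) (out : String) : Prop := out = close_emphasis_py_alt result stripped ch
instance (result : String) (stripped : String) (ch : String) (out : String) : Decidable (Spec_close_emphasis_py result stripped ch out) := by unfold Spec_close_emphasis_py; infer_instance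

-- ===== CLAIM (what is proved, stated in full; the proofs are below) =====
def Claim_equal_close_emphasis_py : Prop := ∀ (result : String) (stripped : String) (ch : String), Dom_close_emphasis_py result stripped ch → Spec_close_emphasis_py result stripped ch (close_emphasis_py result stripped ch)

-- ===== LEMMAS AND PROOFS =====

-- run-length view of the NUL-separated chunks of a list
def pvChunks : List Char → List Nat
  | [] => []
  | c :: m =>
    if c = '\u0000' then pvChunks m
    else
      let k := (m.takeWhile (fun a => !(a == '\u0000'))).length
      (k + 1) :: pvChunks (m.drop k)
  termination_by l => l.length
  decreasing_by all_goals (simp; try omega)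

theorem pvChunks_nil : pvChunks [] = [] := by rw [pvChunks.eq_def]

theorem pvChunks_nul (m : List Char) : pvChunks ('\u0000' :: m) = pvChunks m := by
  rw [pvChunks.eq_def]; simp

theorem pvChunks_cons (c : Char) (m : List Char) (hc : c ≠ '\u0000') :
    pvChunks (c :: m) =
      ((m.takeWhile (fun a => !(a == '\u0000'))).length + 1) ::
        pvChunks (m.drop (m.takeWhile (fun a => !(a == '\u0000'))).length) := by
  rw [pvChunks.eq_def]; simp [hc]

theorem pvPairLoop_eq (r : Nat) (b : Bool) :
    pvPairLoop r b = (r % 2, b ^^ decide ((r / 2) % 2 = 1)) := by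
  induction r using Nat.strong_induction_on generalizing b with
  | _ r ih =>
    rw [pvPairLoop]
    by_cases h : r ≥ 2
    · simp only [if_pos h, ih (r - 2) (by omega)]
      have h2 : (r - 2) % 2 = r % 2 := by omega
      have h3 : r / 2 = (r - 2) / 2 + 1 := by omega
      rw [h2, h3]
      rcases Nat.mod_two_eq_zero_or_one ((r - 2) / 2) with hm | hm <;>
        have hm1 : ((r - 2) / 2 + 1) % 2 = 1 - (r - 2) / 2 % 2 := by omega
      all_goals rw [hm1, hm] <;> cases b <;> simp [hm]
    · simp only [if_neg h]
      have h0 : r % 2 = r ∧ r / 2 = 0 := by omega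
      simp [h0.1, h0.2]

theorem pvParity_add (x y : Nat) :
    decide ((x + y) % 2 = 1) = (decide (x % 2 = 1) ^^ decide (y % 2 = 1)) := by
  rcases Nat.mod_two_eq_zero_or_one x with h | h <;>
    rcases Nat.mod_two_eq_zero_or_one y with h2 | h2 <;>
    rw [Nat.add_mod, h, h2] <;> simp

-- A's fold over the run list computes exactly the two parity sums.
theorem pvFold_eq_parity (rs : List Nat) (b it : Bool) :
    rs.foldl (fun (st : Bool × Bool) run =>
        let p := pvPairLoop run st.1
        (p.2, if p.1 = 1 then !st.2 else st.2)) (b, it) =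
      (b ^^ decide (((rs.map (· / 2)).sum) % 2 = 1),
       it ^^ decide (((rs.map (· % 2)).sum) % 2 = 1)) := by
  induction rs generalizing b it with
  | nil => simp
  | cons r t ih =>
    rw [List.foldl_cons]
    have hstep : (let p := pvPairLoop r (b, it).1
        ((p.2 : Bool), if p.1 = 1 then !(b, it).2 else (b, it).2)) =
        ((b ^^ decide ((r / 2) % 2 = 1) : Bool), if r % 2 = 1 then !it else it) := by
      simp [pvPairLoop_eq]
    rw [hstep, ih, List.map_cons, List.sum_cons, List.map_cons, List.sum_cons, Prod.mk.injEq]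
    constructor
    · rw [pvParity_add, Bool.xor_assoc]
    · rw [pvParity_add]
      generalize decide ((List.map (fun x => x % 2) t).sum % 2 = 1) = q
      rcases Nat.mod_two_eq_zero_or_one r with h | h <;> cases it <;> cases q <;> simp [h]

-- structure of splitOnP: first chunk = takeWhile, rest = splitOnP past the first separator
theorem pvSplitOnP_structure (p : Char → Bool) (m : List Char) :
    m.splitOnP p =
      m.takeWhile (fun a => !p a) ::
        (match m.dropWhile (fun a => !p a) with
          | [] => []
          | _ :: t => t.splitOnP p) := by
  induction m with
  | nil => simp
  | cons c m ih =>
    by_cases h : p c = true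
    · simp [List.splitOnP_cons, h]
    · have h' : p c = false := by simpa using h
      simp only [List.splitOnP_cons, h', List.takeWhile_cons, List.dropWhile_cons,
        Bool.not_false, Bool.false_eq_true, if_false, if_true]
      rw [ih]
      simp

theorem pvTakeWhile_append_all {q : Char → Bool} {a : List Char} (b : List Char)
    (h : ∀ x ∈ a, q x = true) : (a ++ b).takeWhile q = a ++ b.takeWhile q := by
  induction a with
  | nil => simp
  | cons x t ih =>
    have hx := h x (by simp)
    simp [List.takeWhile_cons, hx, ih (fun y hy => h y (by simp [hy]))]

theorem pvDrop_takeWhile_length (q : Char → Bool) (l : List Char) :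
    l.drop (l.takeWhile q).length = l.dropWhile q := by
  induction l with
  | nil => simp
  | cons c t ih =>
    by_cases h : q c = true
    · simp [List.takeWhile_cons, List.dropWhile_cons, h, ih]
    · have h' : q c = false := by simpa using h
      simp [List.takeWhile_cons, List.dropWhile_cons, h']

theorem pvDropWhile_head_false (q : Char → Bool) (l : List Char) :
    ∀ d t, l.dropWhile q = d :: t → q d = false := by
  induction l with
  | nil => intro d t h; simp at h
  | cons c m ih =>
    intro d t h
    by_cases hc : q c = true
    · rw [List.dropWhile_cons, if_pos hc] at h; exact ih d t h
    · have hc' : q c = false := by simpa using hc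
      rw [List.dropWhile_cons, hc'] at h
      simp only [Bool.false_eq_true, if_false] at h
      cases h; exact hc'

-- pvChunks computes the filtered-split run lengths of Source B
theorem pvChunks_eq_split : ∀ (n : Nat) (m : List Char), m.length ≤ n →
    pvChunks m = ((m.splitOn '\u0000').filter (· ≠ [])).map List.length := by
  intro n
  induction n with
  | zero =>
    intro m hm
    have : m = [] := by cases m <;> simp_all
    subst this
    simp [pvChunks_nil, List.splitOn]
  | succ n ih =>
    intro m hm
    match m with
    | [] => simp [pvChunks_nil, List.splitOn]
    | c :: m =>
      by_cases hc : c = '\u0000'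
      · subst hc
        rw [pvChunks_nul, ih m (by simpa using hm)]
        simp [List.splitOn, List.splitOnP_cons]
      · have hc' : (c == '\u0000') = false := by simpa using hc
        rw [pvChunks_cons c m hc, List.splitOn, List.splitOnP_cons, hc']
        simp only [Bool.false_eq_true, if_false]
        rw [pvSplitOnP_structure]
        rcases hdw : m.dropWhile (fun a => !(a == '\u0000')) with _ | ⟨d, t⟩
        · have hmd : m.drop (m.takeWhile (fun a => !(a == '\u0000'))).length = [] := by
            rw [pvDrop_takeWhile_length, hdw]
          rw [hmd, pvChunks_nil]
          simp [List.length_cons]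
        · have hd : (d == '\u0000') = true := by
            have := pvDropWhile_head_false _ m d t hdw
            simpa using this
          have hd' : d = '\u0000' := by simpa using hd
          have hmd : m.drop (m.takeWhile (fun a => !(a == '\u0000'))).length = d :: t := by
            rw [pvDrop_takeWhile_length, hdw]
          have ht : t.length ≤ n := by
            have h1 : (m.dropWhile (fun a => !(a == '\u0000'))).length ≤ m.length :=
              List.length_dropWhile_le ..
            rw [hdw] at h1
            simp only [List.length_cons] at h1 hm
            omega
          rw [hmd, hd', pvChunks_nul, ih t ht]
          simp [List.splitOn, List.length_cons]

-- the mask of a marker run passes the run through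
theorem pvMaskB_run (ch : String) (hp : ∀ c', (String.ofList [c'] == ch) = true → c' ≠ '\\') :
    ∀ rest : List Char,
      pvMaskB ch rest false =
        rest.takeWhile (fun c' => String.ofList [c'] == ch) ++
          pvMaskB ch (rest.dropWhile (fun c' => String.ofList [c'] == ch)) false := by
  intro rest
  induction rest with
  | nil => simp [pvMaskB]
  | cons d t ih =>
    by_cases hd : (String.ofList [d] == ch) = true
    · have hdb : d ≠ '\\' := hp d hd
      rw [pvMaskB, ih]
      simp [hdb, hd]
    · have hd' : (String.ofList [d] == ch) = false := by simpa using hd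
      simp [List.takeWhile_cons, List.dropWhile_cons, hd']

theorem pvMaskB_true (ch : String) (l : List Char) :
    pvMaskB ch l true = pvMaskB ch (l.drop 1) false := by
  cases l <;> simp [pvMaskB]

-- chunking the mask recovers exactly A's run list
theorem pvChunks_mask_eq_runs (ch : String)
    (hN : ∀ c', (String.ofList [c'] == ch) = true → c' ≠ '\u0000') :
    ∀ l : List Char, pvChunks (pvMaskB ch l false) = pvRunsA ch l := by
  intro l
  induction l using pvRunsA.induct ch with
  | case1 => simp [pvMaskB, pvRunsA, pvChunks_nil]
  | case2 rest ih =>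
    rw [pvRunsA, pvMaskB]
    simp only [if_true, if_pos rfl]
    rw [pvMaskB_true, pvChunks_nul]
    exact ih
  | case3 c rest h1 h2 k ih =>
    have hp : ∀ c', (String.ofList [c'] == ch) = true → c' ≠ '\\' := by
      intro c' hc'
      have e1 : String.ofList [c'] = ch := by simpa using hc'
      have e2 : String.ofList [c] = ch := by simpa using h2
      have : c' = c := by
        have := e1.trans e2.symm
        simpa using congrArg String.toList this
      rw [this]; exact h1
    rw [pvRunsA]
    simp only [if_neg h1, if_pos h2]
    rw [pvMaskB]
    simp only [if_neg h1, if_pos h2]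
    rw [pvMaskB_run ch hp rest]
    have hcN : c ≠ '\u0000' := hN c h2
    rw [pvChunks_cons c _ hcN]
    have hall : ∀ x ∈ rest.takeWhile (fun c' => String.ofList [c'] == ch),
        (!(x == '\u0000')) = true := by
      intro x hx
      have hpx := List.mem_takeWhile_imp hx
      have : x ≠ '\u0000' := hN x hpx
      simpa using this
    have hmaskhead : (pvMaskB ch (rest.dropWhile (fun c' => String.ofList [c'] == ch)) false).takeWhile (fun a => !(a == '\u0000')) = [] := by
      rcases hdw : rest.dropWhile (fun c' => String.ofList [c'] == ch) with _ | ⟨d, t⟩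
      · simp [pvMaskB]
      · have hd := pvDropWhile_head_false _ rest d t hdw
        rw [pvMaskB]
        by_cases hdb : d = '\\'
        · simp [hdb]
        · simp [hdb, hd]
    have hTW : ((rest.takeWhile (fun c' => String.ofList [c'] == ch) ++
        pvMaskB ch (rest.dropWhile (fun c' => String.ofList [c'] == ch)) false).takeWhile
          (fun a => !(a == '\u0000'))) = rest.takeWhile (fun c' => String.ofList [c'] == ch) := by
      rw [pvTakeWhile_append_all _ hall, hmaskhead, List.append_nil]
    rw [hTW, List.drop_left]
    have hdweq : rest.dropWhile (fun c' => String.ofList [c'] == ch) =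
        rest.drop (rest.takeWhile (fun c' => String.ofList [c'] == ch)).length :=
      (pvDrop_takeWhile_length _ rest).symm
    rw [hdweq]
    exact congrArg _ ih
  | case4 c rest h1 h2 ih =>
    rw [pvRunsA]
    simp only [if_neg h1, if_neg h2]
    rw [pvMaskB]
    simp only [if_neg h1, if_neg h2]
    rw [pvChunks_nul]
    exact ih

-- ===== VERDICT (by name: the statement is the Claim_ definition above) =====
theorem close_emphasis_py_spec : Claim_equal_close_emphasis_py := by
  intro result stripped ch hdom
  show close_emphasis_py result stripped ch = close_emphasis_py_alt result stripped ch
  have hN : ∀ c', (String.ofList [c'] == ch) = true → c' ≠ '\u0000' := by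
    intro c' hc' hceq
    have e1 : String.ofList [c'] = ch := by simpa using hc'
    have hchl : ch.toList = [c'] := by
      rw [← e1]; simp
    have hdch : pvDomStr ch = true := by
      unfold Dom_close_emphasis_py at hdom
      simp only [Bool.and_eq_true] at hdom
      exact hdom.2
    unfold pvDomStr at hdch
    rw [hchl] at hdch
    simp only [List.all_cons, List.all_nil, Bool.and_true] at hdch
    rw [hceq] at hdch
    simp [pvDomChar] at hdch
  have hruns : pvRunsA ch stripped.toList =
      (((pvMaskB ch stripped.toList false).splitOn '\u0000').filter (· ≠ [])).map List.length := by
    rw [← pvChunks_mask_eq_runs ch hN stripped.toList]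
    exact pvChunks_eq_split (pvMaskB ch stripped.toList false).length _ (le_refl _)
  simp only [close_emphasis_py, close_emphasis_py_alt, ← hruns, pvFold_eq_parity]
  have hbeq : ∀ s : Nat, (s % 2 == 1) = decide (s % 2 = 1) := by
    intro s; rcases Nat.mod_two_eq_zero_or_one s with h | h <;> simp [h]
  rw [hbeq, hbeq]
  generalize decide (((pvRunsA ch stripped.toList).map (· / 2)).sum % 2 = 1) = bold
  generalize decide (((pvRunsA ch stripped.toList).map (· % 2)).sum % 2 = 1) = italic
  cases bold <;> cases italic <;> simp <;> split_ifs <;> simp <;> (apply String.ext; simp)
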